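-- pv_equiv track=rewrite | github.com/Amann09/uav-ugv-path-planning | points_in_circle.py | points_in_multiple_circles
-- ===== SOURCE A (Python) =====
-- def points_in_multiple_circles(waypoints, circles, radius):
--     results = []
--     used_points = set()
--
--     for i, (center_x, center_y) in enumerate(circles):
--         points_inside = []
--
--         for x, y in waypoints:
--             if (x, y) not in used_points and (x - center_x) ** 2 + (y - center_y) ** 2 <= radius ** 2:
--                 points_inside.append((x, y))
--                 used_points.add((x, y))
--
--         results.append((f"Circle {i + 1}: Center {(center_x, center_y)}", points_inside))
--
--     return results
-- ===== SOURCE B (Python) =====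
-- def points_in_multiple_circles(waypoints, circles, radius):
--     # waypoint-major pass: each distinct point goes to the first circle containing it
--     r2 = radius ** 2
--     buckets = [[] for _ in circles]
--     seen = set()
--     for p in waypoints:
--         if p in seen:
--             continue
--         seen.add(p)
--         for i, (cx, cy) in enumerate(circles):
--             if (p[0] - cx) ** 2 + (p[1] - cy) ** 2 <= r2:
--                 buckets[i].append(p)
--                 break
--     return [(f"Circle {i + 1}: Center {(cx, cy)}", buckets[i])
--             for i, (cx, cy) in enumerate(circles)]
-- ===== Notes on version B (the rewrite author's own statement) =====
-- stated objective: faster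
-- what changed: B replaces A's circle-major loop (rescanning the whole waypoint list once per circle with a shared used-set) by a single waypoint-major pass that assigns each distinct waypoint to the first circle containing it (breaking at the first hit) and buckets it there, then emits the buckets.
import Mathlib
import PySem

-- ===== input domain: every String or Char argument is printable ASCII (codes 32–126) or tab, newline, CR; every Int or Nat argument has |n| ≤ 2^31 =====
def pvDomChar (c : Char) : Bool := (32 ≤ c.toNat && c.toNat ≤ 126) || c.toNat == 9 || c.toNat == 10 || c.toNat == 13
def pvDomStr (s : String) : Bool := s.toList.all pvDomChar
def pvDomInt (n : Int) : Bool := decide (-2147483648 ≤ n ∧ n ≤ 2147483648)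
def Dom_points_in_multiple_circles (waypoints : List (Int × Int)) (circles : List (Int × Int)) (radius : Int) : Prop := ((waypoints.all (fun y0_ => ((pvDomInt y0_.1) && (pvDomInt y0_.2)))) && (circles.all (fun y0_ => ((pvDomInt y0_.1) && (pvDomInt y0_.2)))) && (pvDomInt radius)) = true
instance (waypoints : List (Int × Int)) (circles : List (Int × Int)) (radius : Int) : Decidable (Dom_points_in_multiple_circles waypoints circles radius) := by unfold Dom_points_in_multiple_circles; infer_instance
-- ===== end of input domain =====

-- B replaces A's circle-major scan with used-set by a single waypoint-major pass that sends
-- each distinct waypoint to the first circle containing it, breaking at the first hit (measured faster).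

-- shared formatting helper: f"Circle {i + 1}: Center {(cx, cy)}"
def pvLabel (i : Int) (c : Int × Int) : String :=
  "Circle " ++ PySem.Int.toStr (i + 1) ++ ": Center (" ++
    PySem.Int.toStr c.1 ++ ", " ++ PySem.Int.toStr c.2 ++ ")"

-- ===== PORT A =====
def points_in_multiple_circles (waypoints : List (Int × Int)) (circles : List (Int × Int)) (radius : Int) : List (String × (List (Int × Int))) :=
  -- results = []; used_points = set(); for i, (cx, cy) in enumerate(circles): …
  let out := (PySem.List.enumerate circles 0).foldl
    (fun (st : List (String × List (Int × Int)) × PySem.Set (Int × Int)) ic =>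
      -- points_inside = []; for x, y in waypoints: …
      let inner := waypoints.foldl
        (fun (s : List (Int × Int) × PySem.Set (Int × Int)) p =>
          if !(PySem.Set.contains s.2 p) && decide ((p.1 - ic.2.1) ^ 2 + (p.2 - ic.2.2) ^ 2 ≤ radius ^ 2)
          then (s.1 ++ [p], PySem.Set.add s.2 p)
          else s)
        ([], st.2)
      (st.1 ++ [(pvLabel ic.1 ic.2, inner.1)], inner.2))
    ([], PySem.Set.empty)
  out.1

-- ===== PORT B =====
def points_in_multiple_circles_alt (waypoints : List (Int × Int)) (circles : List (Int × Int)) (radius : Int) : List (String × (List (Int × Int))) :=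
  let r2 := radius ^ 2
  -- buckets = [[] for _ in circles]; seen = set(); for p in waypoints: …
  let st := waypoints.foldl
    (fun (s : PySem.Set (Int × Int) × List (List (Int × Int))) p =>
      if PySem.Set.contains s.1 p then s
      else
        -- seen.add(p); then: for i, (cx, cy) in enumerate(circles): if … : buckets[i].append(p); break
        match circles.findIdx? (fun c => decide ((p.1 - c.1) ^ 2 + (p.2 - c.2) ^ 2 ≤ r2)) with
        | some i => (PySem.Set.add s.1 p, s.2.modify i (· ++ [p]))
        | none => (PySem.Set.add s.1 p, s.2))
    (PySem.Set.empty, circles.map (fun _ => ([] : List (Int × Int))))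
  (PySem.List.enumerate circles 0).map (fun ic => (pvLabel ic.1 ic.2, st.2.getD ic.1.toNat []))

-- ===== PRECONDITION & SPEC =====
def Spec_points_in_multiple_circles (waypoints : List (Int × Int)) (circles : List (Int × Int)) (radius : Int) (out : List (String × (List (Int × Int)))) : Prop := out = points_in_multiple_circles_alt waypoints circles radius
instance (waypoints : List (Int × Int)) (circles : List (Int × Int)) (radius : Int) (out : List (String × (List (Int × Int)))) : Decidable (Spec_points_in_multiple_circles waypoints circles radius out) := by unfold Spec_points_in_multiple_circles; infer_instance

-- ===== CLAIM (what is proved, stated in full; the proofs are below) =====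
def Claim_equal_points_in_multiple_circles : Prop := ∀ (waypoints : List (Int × Int)) (circles : List (Int × Int)) (radius : Int), Dom_points_in_multiple_circles waypoints circles radius → Spec_points_in_multiple_circles waypoints circles radius (points_in_multiple_circles waypoints circles radius)

-- ===== LEMMAS AND PROOFS =====

-- "p lies inside the circle centred at c"
def pvInC (radius : Int) (c p : Int × Int) : Bool :=
  decide ((p.1 - c.1) ^ 2 + (p.2 - c.2) ^ 2 ≤ radius ^ 2)

-- index of the first circle containing p
def pvK (radius : Int) (circles : List (Int × Int)) (p : Int × Int) : Option Nat :=
  circles.findIdx? (fun c => pvInC radius c p)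

-- first occurrences of xs not in seen s (dedup against an evolving seen list)
def pvDD (s : List (Int × Int)) : List (Int × Int) → List (Int × Int)
  | [] => []
  | p :: ps => if p ∈ s then pvDD s ps else p :: pvDD (s ++ [p]) ps

-- what A's inner loop collects for one circle, given used list u
def pvCollect (radius : Int) (c : Int × Int) (u : List (Int × Int)) : List (Int × Int) → List (Int × Int)
  | [] => []
  | p :: ps =>
    if p ∈ u then pvCollect radius c u ps
    else if pvInC radius c p then p :: pvCollect radius c (u ++ [p]) ps
    else pvCollect radius c u ps

-- A's outer loop as structural recursion over the enumerated circles
def pvSpecA (radius : Int) (wps : List (Int × Int)) : List (Int × (Int × Int)) → List (Int × Int) → List (String × List (Int × Int))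
  | [], _ => []
  | ic :: rest, u =>
    let L := pvCollect radius ic.2 u wps
    (pvLabel ic.1 ic.2, L) :: pvSpecA radius wps rest (u ++ L)

theorem pv_mem_dd (xs : List (Int × Int)) : ∀ (s : List (Int × Int)) (p : Int × Int),
    p ∈ pvDD s xs ↔ p ∈ xs ∧ p ∉ s := by
  induction xs with
  | nil => simp [pvDD]
  | cons q qs ih =>
    intro s p
    by_cases hq : q ∈ s
    · simp only [pvDD, if_pos hq, ih, List.mem_cons]
      by_cases hpq : p = q <;> subst_eqs <;> tauto
    · simp only [pvDD, if_neg hq, List.mem_cons, ih, List.mem_append]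
      by_cases hpq : p = q <;> subst_eqs <;> tauto

-- dedup against seen s = global dedup then filter out s  (generalized for the induction)
theorem pv_dd_filter (xs : List (Int × Int)) : ∀ (s t s0 : List (Int × Int)),
    (∀ p, p ∈ s ↔ p ∈ t ∨ p ∈ s0) →
    pvDD s xs = (pvDD t xs).filter (fun p => !(decide (p ∈ s0))) := by
  induction xs with
  | nil => intro s t s0 _; simp [pvDD]
  | cons q qs ih =>
    intro s t s0 H
    by_cases ht : q ∈ t
    · have hs : q ∈ s := (H q).2 (Or.inl ht)
      simp only [pvDD, if_pos ht, if_pos hs]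
      exact ih s t s0 H
    · by_cases h0 : q ∈ s0
      · have hs : q ∈ s := (H q).2 (Or.inr h0)
        simp only [pvDD, if_pos hs, if_neg ht, List.filter_cons]
        rw [if_neg (by simp [h0])]
        exact ih s (t ++ [q]) s0 (by
          intro p; rw [H p]; simp only [List.mem_append, List.mem_singleton]
          constructor
          · rintro (h | h); exact Or.inl (Or.inl h); exact Or.inr h
          · rintro ((h | rfl) | h)
            · exact Or.inl h
            · exact Or.inr h0
            · exact Or.inr h)
      · have hs : q ∉ s := fun h => ((H q).1 h).elim ht h0
        simp only [pvDD, if_neg hs, if_neg ht, List.filter_cons]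
        rw [if_pos (by simp [h0])]
        congr 1
        exact ih (s ++ [q]) (t ++ [q]) s0 (by
          intro p; simp only [List.mem_append, List.mem_singleton, H p]
          tauto)

-- filtered dedup only depends on seen-membership of elements satisfying the filter
theorem pv_dd_congr (radius : Int) (c : Int × Int) (xs : List (Int × Int)) :
    ∀ (s1 s2 : List (Int × Int)),
    (∀ q, pvInC radius c q = true → (q ∈ s1 ↔ q ∈ s2)) →
    (pvDD s1 xs).filter (pvInC radius c) = (pvDD s2 xs).filter (pvInC radius c) := by
  induction xs with
  | nil => intro s1 s2 _; simp [pvDD]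
  | cons q qs ih =>
    intro s1 s2 H
    by_cases hc : pvInC radius c q = true
    · by_cases h1 : q ∈ s1
      · have h2 : q ∈ s2 := (H q hc).1 h1
        simp only [pvDD, if_pos h1, if_pos h2]; exact ih s1 s2 H
      · have h2 : q ∉ s2 := fun h => h1 ((H q hc).2 h)
        simp only [pvDD, if_neg h1, if_neg h2, List.filter_cons, hc, if_pos]
        congr 1
        exact ih (s1 ++ [q]) (s2 ++ [q]) (fun r hr => by
          simp only [List.mem_append, List.mem_singleton]
          rw [H r hr])
    · have step : ∀ s : List (Int × Int),
          (pvDD s (q :: qs)).filter (pvInC radius c)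
            = if q ∈ s then (pvDD s qs).filter (pvInC radius c)
              else (pvDD (s ++ [q]) qs).filter (pvInC radius c) := by
        intro s
        by_cases h : q ∈ s
        · simp [pvDD, h]
        · simp [pvDD, h, hc]
      rw [step s1, step s2]
      have ext : ∀ (a b : List (Int × Int)),
          (∀ q, pvInC radius c q = true → (q ∈ a ↔ q ∈ b)) →
          (pvDD a qs).filter (pvInC radius c) = (pvDD b qs).filter (pvInC radius c) := ih
      by_cases h1 : q ∈ s1 <;> by_cases h2 : q ∈ s2
      · simp only [if_pos h1, if_pos h2]; exact ext _ _ H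
      · simp only [if_pos h1, if_neg h2]
        exact ext _ _ (fun r hr => by
          simp only [List.mem_append, List.mem_singleton]
          constructor
          · intro h; exact Or.inl ((H r hr).1 h)
          · rintro (h | rfl); exact (H r hr).2 h; exact absurd hr (by simp [hc]))
      · simp only [if_neg h1, if_pos h2]
        exact ext _ _ (fun r hr => by
          simp only [List.mem_append, List.mem_singleton]
          constructor
          · rintro (h | rfl); exact (H r hr).1 h; exact absurd hr (by simp [hc])
          · intro h; exact Or.inl ((H r hr).2 h))
      · simp only [if_neg h1, if_neg h2]
        exact ext _ _ (fun r hr => by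
          simp only [List.mem_append, List.mem_singleton]
          rw [H r hr])

-- A's per-circle collection = deduped waypoints filtered by the circle test
theorem pv_collect_eq_filter (radius : Int) (c : Int × Int) (xs : List (Int × Int)) :
    ∀ (u : List (Int × Int)),
    pvCollect radius c u xs = (pvDD u xs).filter (pvInC radius c) := by
  induction xs with
  | nil => intro u; simp [pvCollect, pvDD]
  | cons q qs ih =>
    intro u
    by_cases hu : q ∈ u
    · simp only [pvCollect, pvDD, if_pos hu]; exact ih u
    · by_cases hc : pvInC radius c q = true
      · simp only [pvCollect, pvDD, if_neg hu, List.filter_cons, hc]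
        simp only [if_pos]
        congr 1
        exact ih (u ++ [q])
      · simp only [pvCollect, pvDD, if_neg hu, hc, List.filter_cons]
        rw [if_neg (by simp [hc])]
        rw [ih u]
        exact pv_dd_congr radius c qs u (u ++ [q]) (fun r hr => by
          simp only [List.mem_append, List.mem_singleton]
          constructor
          · exact Or.inl
          · rintro (h | rfl); exact h; exact absurd hr (by simp [hc]))

-- A's inner fold, characterized
theorem pv_inner_fold (radius : Int) (c : Int × Int) (xs : List (Int × Int)) :
    ∀ (acc u : List (Int × Int)),
    (xs.foldl
      (fun (s : List (Int × Int) × PySem.Set (Int × Int)) p =>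
        if !(PySem.Set.contains s.2 p) && decide ((p.1 - c.1) ^ 2 + (p.2 - c.2) ^ 2 ≤ radius ^ 2)
        then (s.1 ++ [p], PySem.Set.add s.2 p)
        else s)
      (acc, u))
    = (acc ++ pvCollect radius c u xs, u ++ pvCollect radius c u xs) := by
  induction xs with
  | nil => intro acc u; simp [pvCollect]
  | cons q qs ih =>
    intro acc u
    by_cases hu : q ∈ u
    · have hcont : PySem.Set.contains u q = true := (PySem.Set.contains_iff u q).2 hu
      simp only [List.foldl_cons, hcont, Bool.not_true, Bool.false_and,
        Bool.false_eq_true, if_false]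
      simp only [pvCollect, if_pos hu]
      exact ih acc u
    · have hcont : PySem.Set.contains u q = false := by
        rw [← Bool.not_eq_true, PySem.Set.contains_iff]; exact hu
      by_cases hc : pvInC radius c q = true
      · have hd : decide ((q.1 - c.1) ^ 2 + (q.2 - c.2) ^ 2 ≤ radius ^ 2) = true := hc
        simp only [List.foldl_cons, hcont, hd, Bool.not_false, Bool.true_and, if_pos]
        rw [PySem.Set.add_of_not_mem hu]
        rw [ih (acc ++ [q]) (u ++ [q])]
        simp only [pvCollect, if_neg hu, if_pos hc]
        simp [List.append_assoc]
      · have hd : decide ((q.1 - c.1) ^ 2 + (q.2 - c.2) ^ 2 ≤ radius ^ 2) = false := by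
          rw [← Bool.not_eq_true]; exact hc
        simp only [List.foldl_cons, hcont, hd, Bool.and_false, Bool.false_eq_true,
          if_false]
        simp only [pvCollect, if_neg hu]
        split
        · next h => exact absurd h (by simp [hc])
        · exact ih acc u

-- A's outer fold = pvSpecA
theorem pv_outer_fold (radius : Int) (wps : List (Int × Int)) (l : List (Int × (Int × Int))) :
    ∀ (acc : List (String × List (Int × Int))) (u : List (Int × Int)),
    (l.foldl
      (fun (st : List (String × List (Int × Int)) × PySem.Set (Int × Int)) ic =>
        let inner := wps.foldl
          (fun (s : List (Int × Int) × PySem.Set (Int × Int)) p =>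
            if !(PySem.Set.contains s.2 p) && decide ((p.1 - ic.2.1) ^ 2 + (p.2 - ic.2.2) ^ 2 ≤ radius ^ 2)
            then (s.1 ++ [p], PySem.Set.add s.2 p)
            else s)
          ([], st.2)
        (st.1 ++ [(pvLabel ic.1 ic.2, inner.1)], inner.2))
      (acc, u))
    = (acc ++ (pvSpecA radius wps l u).map (fun r => r), u ++ (pvSpecA radius wps l u).foldr (fun r t => r.2 ++ t) []) := by
  induction l with
  | nil => intro acc u; simp [pvSpecA]
  | cons ic rest ih =>
    intro acc u
    simp only [List.foldl_cons]
    rw [pv_inner_fold radius ic.2 wps [] u]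
    simp only [List.nil_append]
    rw [ih (acc ++ [(pvLabel ic.1 ic.2, pvCollect radius ic.2 u wps)]) (u ++ pvCollect radius ic.2 u wps)]
    simp [pvSpecA, List.append_assoc, List.map_id']

-- the per-circle bridge: with the right used-set, A's collection is exactly
-- "the deduped waypoints whose first containing circle is circle k"
theorem pv_bridge (radius : Int) (circles : List (Int × Int)) (wps : List (Int × Int))
    (u : List (Int × Int)) (k : Nat) (c : Int × Int)
    (hk : circles[k]? = some c)
    (Hu : ∀ p, p ∈ u ↔ (p ∈ wps ∧ ∃ j, pvK radius circles p = some j ∧ j < k)) :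
    pvCollect radius c u wps
      = (pvDD [] wps).filter (fun p => pvK radius circles p == some k) := by
  rw [pv_collect_eq_filter]
  rw [pv_dd_filter wps u [] u (by intro p; simp)]
  rw [List.filter_filter]
  apply List.filter_congr
  intro p hp
  have hpw : p ∈ wps := ((pv_mem_dd wps [] p).1 hp).1
  have hklen : k < circles.length := by
    rcases List.getElem?_eq_some_iff.1 hk with ⟨h, _⟩; exact h
  have hcge : circles[k]'hklen = c := by
    rcases List.getElem?_eq_some_iff.1 hk with ⟨h, he⟩; exact he
  by_cases hK : pvK radius circles p = some k
  · rcases List.findIdx?_eq_some_iff_getElem.1 hK with ⟨h1, h2, h3⟩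
    have hc : pvInC radius c p = true := by rw [← hcge]; exact h2
    have hnu : p ∉ u := by
      rw [Hu]; rintro ⟨_, j, hj, hjk⟩
      rw [hK] at hj; injection hj with hj; omega
    simp [hK, hc, hnu]
  · have hrhs : (pvK radius circles p == some k) = false := by
      simp [hK]
    rw [hrhs]
    by_cases hc : pvInC radius c p = true
    · -- circle k contains p but pvK p ≠ k ⇒ an earlier circle got it ⇒ p ∈ u
      have hex : ∃ j, pvK radius circles p = some j ∧ j < k := by
        have hne : pvK radius circles p ≠ none := by
          intro hnone
          have := List.findIdx?_eq_none_iff.1 hnone (circles[k]'hklen)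
            (List.getElem_mem hklen)
          rw [hcge] at this
          rw [this] at hc
          exact Bool.false_ne_true hc
        rcases Option.ne_none_iff_exists'.1 hne with ⟨j, hj⟩
        refine ⟨j, hj, ?_⟩
        rcases List.findIdx?_eq_some_iff_getElem.1 hj with ⟨hjlen, _, hmin⟩
        by_contra hge
        have hkj : k < j ∨ k = j := by omega
        rcases hkj with hkj | rfl
        · exact hmin k hkj (by rw [hcge]; exact hc)
        · exact hK hj
      have hmem : p ∈ u := (Hu p).2 ⟨hpw, hex⟩
      simp [hmem]
    · have hcf : pvInC radius c p = false := Bool.not_eq_true _ |>.mp hc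
      simp [hcf]

-- getD after List.modify at an in-range index
theorem pv_getD_modify (l : List (List (Int × Int))) (i k : Nat)
    (f : List (Int × Int) → List (Int × Int)) (hi : i < l.length) :
    ((l.modify i f).getD k []) = if k = i then f (l.getD k []) else l.getD k [] := by
  simp only [List.getD_eq_getElem?_getD, List.getElem?_modify]
  by_cases h : k = i
  · subst h
    rw [List.getElem?_eq_getElem hi]
    simp
  · have : ¬ (i = k) := fun hh => h hh.symm
    simp [this]
    exact fun hh => absurd hh h

-- B's bucket fold, characterized
theorem pv_bucket_fold (radius : Int) (circles : List (Int × Int)) (xs : List (Int × Int)) :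
    ∀ (u : List (Int × Int)) (B : List (List (Int × Int))),
    circles.length = B.length →
    ∀ k, k < B.length →
    ((xs.foldl
      (fun (s : PySem.Set (Int × Int) × List (List (Int × Int))) p =>
        if PySem.Set.contains s.1 p then s
        else
          match circles.findIdx? (fun c => decide ((p.1 - c.1) ^ 2 + (p.2 - c.2) ^ 2 ≤ radius ^ 2)) with
          | some i => (PySem.Set.add s.1 p, s.2.modify i (· ++ [p]))
          | none => (PySem.Set.add s.1 p, s.2))
      (u, B)).2).getD k []
    = B.getD k [] ++ (pvDD u xs).filter (fun p => pvK radius circles p == some k) := by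
  induction xs with
  | nil => intro u B _ k _; simp [pvDD]
  | cons p ps ih =>
    intro u B hlen k hk
    simp only [List.foldl_cons]
    by_cases hu : p ∈ u
    · have hcont : PySem.Set.contains u p = true := (PySem.Set.contains_iff u p).2 hu
      rw [if_pos hcont]
      simp only [pvDD, if_pos hu]
      exact ih u B hlen k hk
    · have hcont : PySem.Set.contains u p = false := by
        rw [← Bool.not_eq_true, PySem.Set.contains_iff]; exact hu
      rw [if_neg (by rw [hcont]; exact Bool.false_ne_true)]
      have hadd : PySem.Set.add u p = u ++ [p] := PySem.Set.add_of_not_mem hu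
      simp only [pvDD, if_neg hu, List.filter_cons]
      cases hKp : circles.findIdx? (fun c => decide ((p.1 - c.1) ^ 2 + (p.2 - c.2) ^ 2 ≤ radius ^ 2)) with
      | none =>
        have hKp' : pvK radius circles p = none := hKp
        rw [if_neg (by simp [hKp'])]
        simp only [hadd]
        exact ih (u ++ [p]) B hlen k hk
      | some i =>
        have hKp' : pvK radius circles p = some i := hKp
        have hilen : i < circles.length := by
          rcases List.findIdx?_eq_some_iff_getElem.1 hKp with ⟨h1, _, _⟩; exact h1
        have hiB : i < B.length := hlen ▸ hilen
        simp only [hadd]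
        rw [ih (u ++ [p]) (B.modify i (· ++ [p]))
          (by rw [hlen, List.length_modify]) k (by rw [List.length_modify]; exact hk)]
        rw [pv_getD_modify B i k (· ++ [p]) hiB]
        by_cases hki : k = i
        · subst hki
          rw [if_pos rfl, if_pos (by simp [hKp'])]
          simp [List.append_assoc]
        · rw [if_neg hki, if_neg (by simp [hKp', Ne.symm, hki])]

-- the main induction: A's sequential per-circle collection, over the enumerated
-- suffix of circles, equals B's first-containing-circle bucketing
theorem pv_specA_eq (radius : Int) (circles : List (Int × Int)) (wps : List (Int × Int)) :
    ∀ (cs : List (Int × Int)) (k : Nat) (u : List (Int × Int)),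
    (∃ pre : List (Int × Int), circles = pre ++ cs ∧ pre.length = k) →
    (∀ p, p ∈ u ↔ (p ∈ wps ∧ ∃ j, pvK radius circles p = some j ∧ j < k)) →
    pvSpecA radius wps (PySem.List.enumerate cs (k : Int)) u
      = (PySem.List.enumerate cs (k : Int)).map
          (fun ic => (pvLabel ic.1 ic.2,
            (pvDD [] wps).filter (fun p => pvK radius circles p == some ic.1.toNat))) := by
  intro cs
  induction cs with
  | nil => intro k u _ _; simp [PySem.List.enumerate_nil, pvSpecA]
  | cons c cs' ihc =>
    intro k u hsplit Hu
    rcases hsplit with ⟨pre, hcirc, hprelen⟩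
    have hck : circles[k]? = some c := by
      rw [hcirc, ← hprelen]
      rw [List.getElem?_append_right (Nat.le_refl _)]
      simp
    rw [PySem.List.enumerate_cons]
    have hL := pv_bridge radius circles wps u k c hck Hu
    simp only [pvSpecA]
    rw [List.map_cons]
    have hhead : ((k : Int), c).1.toNat = k := by simp
    congr 1
    · rw [hL]
      simp
    · rw [hL]
      have hcast : (k : Int) + 1 = ((k + 1 : Nat) : Int) := by push_cast; ring
      rw [hcast]
      apply ihc (k + 1)
      · exact ⟨pre ++ [c], by simp [hcirc], by simp [hprelen]⟩
      · intro p
        simp only [List.mem_append, List.mem_filter, pv_mem_dd, beq_iff_eq]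
        constructor
        · rintro (hp | ⟨⟨hpw, -⟩, hKp⟩)
          · rcases (Hu p).1 hp with ⟨hpw, j, hj, hjk⟩
            exact ⟨hpw, j, hj, by omega⟩
          · exact ⟨hpw, k, hKp, by omega⟩
        · rintro ⟨hpw, j, hj, hjk⟩
          by_cases hjlt : j < k
          · exact Or.inl ((Hu p).2 ⟨hpw, j, hj, hjlt⟩)
          · have : j = k := by omega
            subst this
            exact Or.inr ⟨⟨hpw, by simp⟩, hj⟩

-- Port A in closed form
theorem pv_a_eq (wps circles : List (Int × Int)) (radius : Int) :
    points_in_multiple_circles wps circles radius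
      = pvSpecA radius wps (PySem.List.enumerate circles 0) [] := by
  unfold points_in_multiple_circles
  rw [pv_outer_fold radius wps (PySem.List.enumerate circles 0) [] PySem.Set.empty]
  simp [List.map_id']

-- Port B in closed form
theorem pv_b_eq (wps circles : List (Int × Int)) (radius : Int) :
    points_in_multiple_circles_alt wps circles radius
      = (PySem.List.enumerate circles 0).map
          (fun ic => (pvLabel ic.1 ic.2,
            (pvDD [] wps).filter (fun p => pvK radius circles p == some ic.1.toNat))) := by
  unfold points_in_multiple_circles_alt
  apply List.map_congr_left
  intro ic hic
  rcases (PySem.List.mem_enumerate_iff circles 0 ic).1 hic with ⟨kk, hkk, hics⟩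
  subst hics
  simp only [Int.zero_add, Int.toNat_natCast]
  congr 1
  have hBlen : circles.length = (circles.map (fun _ => ([] : List (Int × Int)))).length := by
    simp
  have hkB : kk < (circles.map (fun _ => ([] : List (Int × Int)))).length := by
    simpa using hkk
  rw [pv_bucket_fold radius circles wps PySem.Set.empty
    (circles.map (fun _ => ([] : List (Int × Int)))) hBlen kk hkB]
  have hinit : (circles.map (fun _ => ([] : List (Int × Int)))).getD kk [] = [] := by
    simp [List.getD_eq_getElem?_getD]
  rw [hinit]
  simp [PySem.Set.empty]

-- ===== VERDICT (by name: the statement is the Claim_ definition above) =====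
theorem points_in_multiple_circles_spec : Claim_equal_points_in_multiple_circles := by
  intro wps circles radius _
  show points_in_multiple_circles wps circles radius
      = points_in_multiple_circles_alt wps circles radius
  rw [pv_a_eq, pv_b_eq]
  have h0 : (0 : Int) = ((0 : Nat) : Int) := rfl
  rw [h0]
  exact pv_specA_eq radius circles wps circles 0 []
    ⟨[], by simp, rfl⟩ (by intro p; simp)
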